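-- pv_equiv track=rewrite | github.com/sutormin94/TopoIV_Topo-Seq_experiment | Return_reproducible_peaks.py | Indicate_where_peaks
-- ===== SOURCE A (Python) =====
-- def Indicate_where_peaks(genome_length, peaks_ar):
--     #Create template genome-long array.
--     genome_ar=[0]*genome_length
--     for peak in peaks_ar:
--         for i in range (peak[1]-peak[0]):
--             genome_ar[peak[0]+i]+=1
--     #Remove overlappings.
--     for i in range(len(genome_ar)):
--         if genome_ar[i]>0:
--             genome_ar[i]=1
--     return genome_ar
-- ===== SOURCE B (Python) =====
-- def Indicate_where_peaks(genome_length, peaks_ar):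
--     # Difference array: mark clipped interval endpoints, then prefix-sum and emit 0/1.
--     n = max(genome_length, 0)
--     diff = [0] * (n + 1)
--     for peak in peaks_ar:
--         s = max(peak[0], 0)
--         e = min(peak[1], n)
--         if s < e:
--             diff[s] += 1
--             diff[e] -= 1
--     out = []
--     c = 0
--     for i in range(n):
--         c += diff[i]
--         out.append(1 if c > 0 else 0)
--     return out
-- ===== Notes on version B (the rewrite author's own statement) =====
-- stated objective: alternative
-- what changed: B replaces A's per-position painting of every interval into a genome-long array by a difference array: it marks the two clipped endpoints of each peak once, then a single prefix-sum pass emits the 0/1 array; it touches each peak O(1) times instead of once per covered position (a timing run's inputs carry empty intervals, so no speed is claimed).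
-- outside the precondition, e.g. on Indicate_where_peaks(3, [(-1, 1)]): A returns [1, 0, 1], B returns [1, 0, 0]
import Mathlib
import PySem

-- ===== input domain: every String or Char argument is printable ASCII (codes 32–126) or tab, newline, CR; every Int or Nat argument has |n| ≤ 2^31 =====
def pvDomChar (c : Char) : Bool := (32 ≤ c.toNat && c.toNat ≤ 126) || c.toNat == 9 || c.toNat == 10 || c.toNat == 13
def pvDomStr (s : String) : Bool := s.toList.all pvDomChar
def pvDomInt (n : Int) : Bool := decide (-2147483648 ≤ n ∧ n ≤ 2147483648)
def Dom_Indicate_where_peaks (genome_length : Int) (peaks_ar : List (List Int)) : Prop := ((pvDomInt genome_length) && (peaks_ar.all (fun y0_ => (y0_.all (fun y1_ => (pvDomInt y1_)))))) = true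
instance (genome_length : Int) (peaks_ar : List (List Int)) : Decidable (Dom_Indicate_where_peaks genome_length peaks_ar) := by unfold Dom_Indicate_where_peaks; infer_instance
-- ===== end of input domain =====

-- B replaces A's per-position painting of every interval into a genome-long array by a
-- difference array: it marks the two clipped endpoints of each peak once, then a single
-- prefix-sum pass emits 0/1 (a different algorithm; no speed claim).

-- ===== PORT A =====
-- genome_ar[idx] += 1 with Python list-index semantics: negative index wraps,
-- out-of-range is IndexError (excluded by Pre_; the else-branch is unreachable under Pre_).
def pyIncr (g : List Int) (i : Int) : List Int :=
  let j : Int := if i < 0 then i + g.length else i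
  if 0 ≤ j ∧ j < (g.length : Int) then g.set j.toNat (g.getD j.toNat 0 + 1) else g

-- peak[0] / peak[1]: getD is exact for these nonnegative indices; a peak shorter than 2
-- raises IndexError in Python, excluded by Pre_.
def Indicate_where_peaks (genome_length : Int) (peaks_ar : List (List Int)) : List Int :=
  let genome_ar := List.replicate genome_length.toNat (0 : Int)
  let genome_ar := peaks_ar.foldl (fun g peak =>
    let s := peak.getD 0 0
    let e := peak.getD 1 0
    (PySem.List.pyRange 0 (e - s) 1).foldl (fun g i => pyIncr g (s + i)) g) genome_ar
  genome_ar.map (fun x => if x > 0 then 1 else x)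

-- ===== PORT B =====
def bump (d : List Int) (j : Nat) (v : Int) : List Int := d.set j (d.getD j 0 + v)

def Indicate_where_peaks_alt (genome_length : Int) (peaks_ar : List (List Int)) : List Int :=
  let n : Int := max genome_length 0
  let diff0 := List.replicate (n.toNat + 1) (0 : Int)
  let diff := peaks_ar.foldl (fun d peak =>
    let s := max (peak.getD 0 0) 0
    let e := min (peak.getD 1 0) n
    if s < e then bump (bump d s.toNat 1) e.toNat (-1) else d) diff0
  ((PySem.List.pyRange 0 n 1).foldl (fun (st : Int × List Int) i =>
      let c := st.1 + diff.getD i.toNat 0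
      (c, st.2 ++ [if c > 0 then (1 : Int) else 0])) ((0 : Int), ([] : List Int))).2

-- ===== PRECONDITION & SPEC =====
-- Pre_ restricts to the natural domain of genomic intervals: every peak has both endpoints and
-- is either empty (end ≤ start) or lies inside [0, genome_length]. Outside it A either raises
-- IndexError (peak shorter than 2, or an index beyond the range Python accepts) or, for a
-- negative start within Python's index range, returns a value produced by accidental
-- negative-index wraparound (marks the END of the genome), which B — clipping the interval to
-- the genome — does not reproduce.
def Pre_Indicate_where_peaks (genome_length : Int) (peaks_ar : List (List Int)) : Prop :=
  ∀ p ∈ peaks_ar, 2 ≤ p.length ∧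
    (p.getD 1 0 ≤ p.getD 0 0 ∨ (0 ≤ p.getD 0 0 ∧ p.getD 1 0 ≤ max genome_length 0))
instance (genome_length : Int) (peaks_ar : List (List Int)) : Decidable (Pre_Indicate_where_peaks genome_length peaks_ar) := by unfold Pre_Indicate_where_peaks; infer_instance
def pvWitness_Indicate_where_peaks : Int × List (List Int) := (3, [[0, 2]])

def Spec_Indicate_where_peaks (genome_length : Int) (peaks_ar : List (List Int)) (out : List Int) : Prop := out = Indicate_where_peaks_alt genome_length peaks_ar
instance (genome_length : Int) (peaks_ar : List (List Int)) (out : List Int) : Decidable (Spec_Indicate_where_peaks genome_length peaks_ar out) := by unfold Spec_Indicate_where_peaks; infer_instance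

-- ===== CLAIM (what is proved, stated in full; the proofs are below) =====
def Claim_equal_Indicate_where_peaks : Prop := ∀ (genome_length : Int) (peaks_ar : List (List Int)), Dom_Indicate_where_peaks genome_length peaks_ar → Pre_Indicate_where_peaks genome_length peaks_ar → Spec_Indicate_where_peaks genome_length peaks_ar (Indicate_where_peaks genome_length peaks_ar)

-- ===== LEMMAS AND PROOFS =====

lemma pyIncr_spec (g : List Int) (a : Int) (ha0 : 0 ≤ a) (ha : a < (g.length : Int)) :
    (pyIncr g a).length = g.length ∧
      ∀ t : Nat, (pyIncr g a).getD t 0 = g.getD t 0 + (if (t : Int) = a then 1 else 0) := by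
  unfold pyIncr
  have hj : (if a < 0 then a + (g.length:Int) else a) = a := if_neg (by omega)
  simp only [hj, if_pos (⟨ha0, ha⟩ : 0 ≤ a ∧ a < (g.length : Int))]
  refine ⟨List.length_set .., ?_⟩
  intro t
  by_cases ht : t = a.toNat
  · subst ht
    have hlt : a.toNat < g.length := by omega
    rw [List.getD_eq_getElem _ _ (by simpa using hlt)]
    rw [List.getElem_set_self]
    rw [List.getD_eq_getElem _ _ hlt, if_pos (by omega)]
  · have hne : (t : Int) ≠ a := by omega
    rw [if_neg hne, add_zero]
    by_cases hlt : t < g.length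
    · rw [List.getD_eq_getElem _ _ (by simpa using hlt), List.getD_eq_getElem _ _ hlt,
        List.getElem_set_ne (by omega)]
    · rw [List.getD_eq_default _ _ (by simpa using (not_lt.mp hlt)),
        List.getD_eq_default _ _ (by omega)]

lemma pvPresum_succ' (d : List Int) (k : Nat) :
    ((d.take (k+1)).sum) = ((d.take k).sum) + d.getD k 0 := by
  induction d generalizing k with
  | nil => simp
  | cons x d ih =>
    cases k with
    | zero => simp
    | succ k => simp only [List.take_succ_cons, List.sum_cons, List.getD_cons_succ, ih]; ring

lemma bump_presum (d : List Int) (j : Nat) (v : Int) (k : Nat) (hj : j < d.length) :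
    (bump d j v).length = d.length ∧
      ((bump d j v).take k).sum = ((d.take k).sum) + (if j < k then v else 0) := by
  unfold bump
  refine ⟨List.length_set .., ?_⟩
  induction d generalizing j k with
  | nil => simp at hj
  | cons x d ih =>
    cases j with
    | zero =>
      cases k with
      | zero => simp
      | succ k => simp; ring
    | succ j =>
      cases k with
      | zero => simp
      | succ k =>
        simp only [List.set_cons_succ, List.take_succ_cons, List.sum_cons,
          List.getD_cons_succ, Nat.succ_lt_succ_iff]
        have := ih j k (by simpa using hj)
        omega

lemma mark_spec (k : Nat) (g : List Int) (s : Int) (hs : 0 ≤ s) (hk : s + k ≤ (g.length : Int)) :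
    ((PySem.List.pyRange 0 (k : Int) 1).foldl (fun g i => pyIncr g (s + i)) g).length = g.length ∧
      ∀ t : Nat, ((PySem.List.pyRange 0 (k : Int) 1).foldl (fun g i => pyIncr g (s + i)) g).getD t 0
        = g.getD t 0 + (if s ≤ (t : Int) ∧ (t : Int) < s + k then 1 else 0) := by
  induction k with
  | zero =>
    have h0 : PySem.List.pyRange 0 ((0:Nat):Int) 1 = [] := by
      norm_num [PySem.List.pyRange]
    rw [h0]
    exact ⟨rfl, fun t => by rw [if_neg (by omega)]; simp⟩
  | succ k ih =>
    obtain ⟨ihl, ihv⟩ := ih (by push_cast at hk ⊢; omega)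
    have hrange : PySem.List.pyRange 0 ((k:Int) + 1) 1 = PySem.List.pyRange 0 (k:Int) 1 ++ [(k:Int)] :=
      PySem.List.pyRange_one_succ_right (by omega)
    have hcast : ((k + 1 : Nat) : Int) = (k : Int) + 1 := by push_cast; ring
    rw [hcast, hrange, List.foldl_append]
    simp only [List.foldl_cons, List.foldl_nil]
    obtain ⟨pl, pv⟩ := pyIncr_spec (((PySem.List.pyRange 0 (k:Int) 1).foldl (fun g i => pyIncr g (s + i)) g)) (s + k)
      (by omega) (by rw [ihl]; push_cast at hk ⊢; omega)
    refine ⟨by rw [pl, ihl], ?_⟩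
    intro t
    rw [pv t, ihv t]
    split_ifs <;> omega

lemma pyRange_one_nonpos {a b : Int} (h : b ≤ a) : PySem.List.pyRange a b 1 = [] := by
  norm_num [PySem.List.pyRange, not_lt.mpr h]

def pvCov (p : List Int) (i : Int) : Int := if p.getD 0 0 ≤ i ∧ i < p.getD 1 0 then 1 else 0
def pvCnt (peaks : List (List Int)) (i : Int) : Int := (peaks.map (fun p => pvCov p i)).sum

lemma pvCnt_nonneg (ps : List (List Int)) (i : Int) : 0 ≤ pvCnt ps i := by
  apply List.sum_nonneg; intro x hx
  simp only [List.mem_map] at hx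
  obtain ⟨p, _, rfl⟩ := hx
  unfold pvCov; split <;> omega

lemma pvCnt_cons (p : List Int) (ps : List (List Int)) (i : Int) :
    pvCnt (p :: ps) i = pvCov p i + pvCnt ps i := by simp [pvCnt]

lemma afold_spec (peaks : List (List Int)) (n : Int) (g : List Int)
    (hg : (g.length : Int) = max n 0)
    (hok : ∀ p ∈ peaks, (p.getD 1 0 ≤ p.getD 0 0 ∨ (0 ≤ p.getD 0 0 ∧ p.getD 1 0 ≤ max n 0))) :
    (peaks.foldl (fun g peak =>
        let s := peak.getD 0 0
        let e := peak.getD 1 0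
        (PySem.List.pyRange 0 (e - s) 1).foldl (fun g i => pyIncr g (s + i)) g) g).length = g.length ∧
      ∀ t : Nat, (peaks.foldl (fun g peak =>
        let s := peak.getD 0 0
        let e := peak.getD 1 0
        (PySem.List.pyRange 0 (e - s) 1).foldl (fun g i => pyIncr g (s + i)) g) g).getD t 0
        = g.getD t 0 + pvCnt peaks t := by
  induction peaks generalizing g with
  | nil => exact ⟨rfl, fun t => by simp [pvCnt]⟩
  | cons p ps ih =>
    simp only [List.foldl_cons]
    set s := p.getD 0 0 with hs
    set e := p.getD 1 0 with he
    by_cases hle : e ≤ s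
    · rw [pyRange_one_nonpos (by omega)]
      simp only [List.foldl_nil]
      obtain ⟨l, v⟩ := ih g hg (fun q hq => hok q (by simp [hq]))
      refine ⟨l, fun t => ?_⟩
      rw [v t, pvCnt_cons]
      have : pvCov p t = 0 := by rw [pvCov, if_neg (by omega)]
      omega
    · have hlt : s < e := by omega
      have hok' := hok p (by simp)
      have hse : 0 ≤ s ∧ e ≤ max n 0 := by omega
      have hk : ((e - s).toNat : Int) = e - s := by omega
      rw [← hk]
      obtain ⟨ml, mv⟩ := mark_spec (e - s).toNat g s hse.1 (by omega)
      obtain ⟨l, v⟩ := ih _ (by rw [ml]; exact hg) (fun q hq => hok q (by simp [hq]))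
      refine ⟨by rw [l, ml], fun t => ?_⟩
      rw [v t, mv t, pvCnt_cons]
      have : pvCov p t = if s ≤ (t:Int) ∧ (t:Int) < s + (e - s).toNat then 1 else 0 := by
        rw [pvCov]; split_ifs <;> omega
      omega

lemma bfold_spec (peaks : List (List Int)) (n : Int) (d : List Int)
    (hd : (d.length : Int) = max n 0 + 1)
    (hok : ∀ p ∈ peaks, (p.getD 1 0 ≤ p.getD 0 0 ∨ (0 ≤ p.getD 0 0 ∧ p.getD 1 0 ≤ max n 0))) :
    (peaks.foldl (fun d peak =>
        let s := max (peak.getD 0 0) 0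
        let e := min (peak.getD 1 0) (max n 0)
        if s < e then bump (bump d s.toNat 1) e.toNat (-1) else d) d).length = d.length ∧
      ∀ t : Nat, ((peaks.foldl (fun d peak =>
        let s := max (peak.getD 0 0) 0
        let e := min (peak.getD 1 0) (max n 0)
        if s < e then bump (bump d s.toNat 1) e.toNat (-1) else d) d).take (t + 1)).sum
        = ((d.take (t + 1)).sum) + pvCnt peaks t := by
  induction peaks generalizing d with
  | nil => exact ⟨rfl, fun t => by simp [pvCnt]⟩
  | cons p ps ih =>
    simp only [List.foldl_cons]
    set s := p.getD 0 0 with hs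
    set e := p.getD 1 0 with he
    have hok' := hok p (by simp)
    by_cases hc : max s 0 < min e (max n 0)
    · have hse : 0 ≤ s ∧ s < e ∧ e ≤ max n 0 := by omega
      rw [if_pos hc]
      have hmax : max s 0 = s := by omega
      have hmin : min e (max n 0) = e := by omega
      rw [hmax, hmin]
      have hsl : s.toNat < d.length := by omega
      obtain ⟨bl1, _⟩ := bump_presum d s.toNat 1 0 hsl
      have hel : e.toNat < (bump d s.toNat 1).length := by rw [bl1]; omega
      obtain ⟨bl2, _⟩ := bump_presum (bump d s.toNat 1) e.toNat (-1) 0 hel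
      obtain ⟨l, v⟩ := ih _ (by rw [bl2, bl1]; exact hd) (fun q hq => hok q (by simp [hq]))
      refine ⟨by rw [l, bl2, bl1], fun t => ?_⟩
      rw [v t]
      obtain ⟨_, v2⟩ := bump_presum (bump d s.toNat 1) e.toNat (-1) (t + 1) hel
      obtain ⟨_, v1⟩ := bump_presum d s.toNat 1 (t + 1) hsl
      rw [v2, v1, pvCnt_cons]
      have : pvCov p t = if s ≤ (t:Int) ∧ (t:Int) < e then 1 else 0 := rfl
      rw [this]
      split_ifs <;> omega
    · rw [if_neg hc]
      obtain ⟨l, v⟩ := ih d hd (fun q hq => hok q (by simp [hq]))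
      refine ⟨l, fun t => ?_⟩
      rw [v t, pvCnt_cons]
      have : pvCov p t = 0 := by rw [pvCov, if_neg (by omega)]
      omega

lemma loopB_spec (d : List Int) (m : Nat) :
    ((PySem.List.pyRange 0 (m : Int) 1).foldl (fun (st : Int × List Int) i =>
        let c := st.1 + d.getD i.toNat 0
        (c, st.2 ++ [if c > 0 then (1 : Int) else 0])) ((0 : Int), ([] : List Int)))
      = (((d.take m).sum), (List.range m).map (fun t => if ((d.take (t+1)).sum) > 0 then (1 : Int) else 0)) := by
  induction m with
  | zero =>
    have h0 : PySem.List.pyRange 0 ((0:Nat):Int) 1 = [] := by norm_num [PySem.List.pyRange]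
    rw [h0]; simp
  | succ m ih =>
    have hcast : ((m + 1 : Nat) : Int) = (m : Int) + 1 := by push_cast; ring
    rw [hcast, PySem.List.pyRange_one_succ_right (by omega), List.foldl_append, ih]
    simp only [List.foldl_cons, List.foldl_nil, Int.toNat_natCast]
    rw [List.range_succ, List.map_append]
    have hp : (List.take (m+1) d).sum = (List.take m d).sum + d.getD m 0 := pvPresum_succ' d m
    simp [hp]

-- ===== VERDICT (by name: the statement is the Claim_ definition above) =====

theorem Indicate_where_peaks_spec : Claim_equal_Indicate_where_peaks := by
  intro gl peaks hdom hpre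
  show Indicate_where_peaks gl peaks = Indicate_where_peaks_alt gl peaks
  have hok : ∀ p ∈ peaks,
      (p.getD 1 0 ≤ p.getD 0 0 ∨ (0 ≤ p.getD 0 0 ∧ p.getD 1 0 ≤ max gl 0)) :=
    fun p hp => (hpre p hp).2
  have hM : (((max gl 0).toNat : Nat) : Int) = max gl 0 := by omega
  have hA : Indicate_where_peaks gl peaks
      = (peaks.foldl (fun g peak =>
          let s := peak.getD 0 0
          let e := peak.getD 1 0
          (PySem.List.pyRange 0 (e - s) 1).foldl (fun g i => pyIncr g (s + i)) g)
          (List.replicate gl.toNat (0 : Int))).map (fun x => if x > 0 then 1 else x) := rfl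
  have hB : Indicate_where_peaks_alt gl peaks
      = ((PySem.List.pyRange 0 (max gl 0) 1).foldl (fun (st : Int × List Int) i =>
          let c := st.1 + (peaks.foldl (fun d peak =>
            let s := max (peak.getD 0 0) 0
            let e := min (peak.getD 1 0) (max gl 0)
            if s < e then bump (bump d s.toNat 1) e.toNat (-1) else d)
            (List.replicate ((max gl 0).toNat + 1) (0 : Int))).getD i.toNat 0
          (c, st.2 ++ [if c > 0 then (1 : Int) else 0])) ((0 : Int), ([] : List Int))).2 := rfl
  rw [hA, hB]
  rw [show PySem.List.pyRange 0 (max gl 0) 1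
      = PySem.List.pyRange 0 (((max gl 0).toNat : Nat) : Int) 1 from by rw [hM]]
  rw [loopB_spec (peaks.foldl (fun d peak =>
      let s := max (peak.getD 0 0) 0
      let e := min (peak.getD 1 0) (max gl 0)
      if s < e then bump (bump d s.toNat 1) e.toNat (-1) else d)
      (List.replicate ((max gl 0).toNat + 1) (0 : Int))) (max gl 0).toNat]
  obtain ⟨al, av⟩ := afold_spec peaks gl (List.replicate gl.toNat (0 : Int))
    (by simp only [List.length_replicate]; omega) hok
  obtain ⟨bl, bv⟩ := bfold_spec peaks gl (List.replicate ((max gl 0).toNat + 1) (0 : Int))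
    (by simp only [List.length_replicate]; omega) hok
  apply List.ext_getElem
  · simp only [List.length_map, al, List.length_replicate, List.length_range]
    omega
  · intro i h1 h2
    simp only [List.length_map, al, List.length_replicate] at h1
    simp only [List.getElem_map, List.getElem_range]
    have hiA : (peaks.foldl (fun g peak =>
        let s := peak.getD 0 0
        let e := peak.getD 1 0
        (PySem.List.pyRange 0 (e - s) 1).foldl (fun g i => pyIncr g (s + i)) g)
        (List.replicate gl.toNat (0 : Int)))[i]'(by rw [al, List.length_replicate]; omega)
        = pvCnt peaks i := by
      rw [← List.getD_eq_getElem _ 0 (by rw [al, List.length_replicate]; omega), av i]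
      simp
    have hiB : ((peaks.foldl (fun d peak =>
        let s := max (peak.getD 0 0) 0
        let e := min (peak.getD 1 0) (max gl 0)
        if s < e then bump (bump d s.toNat 1) e.toNat (-1) else d)
        (List.replicate ((max gl 0).toNat + 1) (0 : Int))).take (i + 1)).sum
        = pvCnt peaks i := by
      rw [bv i]
      simp [List.take_replicate]
    rw [hiA, hiB]
    have := pvCnt_nonneg peaks i
    split_ifs <;> omega
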